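-- pv_equiv track=rewrite | github.com/chieh-eric/LeetCode | 2297-amount-of-new-area-painted-each-day/2297-amount-of-new-area-painted-each-day.py | amountPainted
-- ===== SOURCE A (Python) =====
-- def amountPainted(paint):
--     """
--     :type paint: List[List[int]]
--     :rtype: List[int]
--     """
--     parent = {}
--
--     def find(x):
--         if x not in parent:
--             return x
--         parent[x] = find(parent[x])
--         return parent[x]
--
--     res = []
--     for start, end in paint:
--         painted = 0
--         i = find(start)
--         while i < end:
--             painted += 1
--             parent[i] = i + 1
--             i = find(i+1)
--         res.append(painted)
--     return res
-- ===== SOURCE B (Python) =====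
-- def amountPainted(paint):
--     painted = set()
--     res = []
--     for start, end in paint:
--         new = [c for c in range(start, end) if c not in painted]
--         res.append(len(new))
--         painted.update(new)
--     return res
-- ===== Notes on version B (the rewrite author's own statement) =====
-- stated objective: simpler
-- what changed: Replaces A's memoized jump-pointer dict (union-find with path compression and a cell-by-cell while loop) by a plain set of painted cells: each day counts the cells of range(start,end) not yet in the set and adds them.
import Mathlib
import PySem

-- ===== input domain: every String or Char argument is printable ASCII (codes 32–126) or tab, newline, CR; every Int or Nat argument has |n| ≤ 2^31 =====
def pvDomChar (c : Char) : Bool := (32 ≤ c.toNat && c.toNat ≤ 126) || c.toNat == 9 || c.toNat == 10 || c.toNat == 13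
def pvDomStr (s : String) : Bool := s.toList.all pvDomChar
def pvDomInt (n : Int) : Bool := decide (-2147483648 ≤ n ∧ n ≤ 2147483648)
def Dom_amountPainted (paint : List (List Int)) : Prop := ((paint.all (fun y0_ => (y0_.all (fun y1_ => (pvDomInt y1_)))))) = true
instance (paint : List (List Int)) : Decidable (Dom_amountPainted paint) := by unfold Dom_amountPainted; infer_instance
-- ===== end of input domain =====

-- B replaces A's memoized jump-pointer dict by a plain set of painted cells; objective: simpler.

-- ===== PORT A =====
-- find(x): recursive lookup with path compression; fuel (dict size + 1) only makes the
-- same recursion total — the chain follows strictly increasing keys, so it always suffices.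
def pvFindA (fuel : Nat) (parent : PySem.Dict Int Int) (x : Int) : Int × PySem.Dict Int Int :=
  match fuel with
  | 0 => (x, parent)
  | f + 1 =>
    match parent.get? x with
    | none => (x, parent)
    | some p =>
      let r := pvFindA f parent p
      (r.1, r.2.insert x r.1)

-- the 'while i < end' loop; fuel (end - i).toNat only makes it total (i strictly increases).
def pvWhileA (fuel : Nat) (parent : PySem.Dict Int Int) (i e painted : Int) :
    Int × PySem.Dict Int Int :=
  match fuel with
  | 0 => (painted, parent)
  | f + 1 =>
    if i < e then
      let parent1 := parent.insert i (i + 1)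
      let fr := pvFindA (parent1.size + 1) parent1 (i + 1)
      pvWhileA f fr.2 fr.1 e (painted + 1)
    else (painted, parent)

def amountPainted (paint : List (List Int)) : List Int :=
  (paint.foldl (fun (acc : List Int × PySem.Dict Int Int) row =>
    match row with
    | [s, e] =>
      let f0 := pvFindA (acc.2.size + 1) acc.2 s
      let w := pvWhileA (e - f0.1).toNat f0.2 f0.1 e 0
      (acc.1 ++ [w.1], w.2)
    | _ => acc)  -- rows without exactly two entries raise ValueError in Python (outside Pre_)
    ([], PySem.Dict.empty)).1

-- ===== PORT B =====
def amountPainted_alt (paint : List (List Int)) : List Int :=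
  (paint.foldl (fun (acc : List Int × PySem.Set Int) row =>
    if row.length = 2 then
      let s := row.getD 0 0
      let e := row.getD 1 0
      let new := (PySem.List.pyRange s e 1).filter (fun c => !(PySem.Set.contains acc.2 c))
      (acc.1 ++ [(new.length : Int)], PySem.Set.update acc.2 new)
    else acc)  -- rows without exactly two entries raise ValueError in Python (outside Pre_)
    ([], PySem.Set.empty)).1

-- ===== PRECONDITION & SPEC =====
-- Pre_ excludes only rows without exactly two entries, where Python tuple unpacking
-- raises ValueError.
def Pre_amountPainted (paint : List (List Int)) : Prop :=
  ∀ row ∈ paint, row.length = 2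
instance (paint : List (List Int)) : Decidable (Pre_amountPainted paint) := by
  unfold Pre_amountPainted; infer_instance
def pvWitness_amountPainted : List (List Int) := [[1, 4], [4, 7], [5, 8]]
def Spec_amountPainted (paint : List (List Int)) (out : List Int) : Prop := out = amountPainted_alt paint
instance (paint : List (List Int)) (out : List Int) : Decidable (Spec_amountPainted paint out) := by unfold Spec_amountPainted; infer_instance

-- ===== CLAIM (what is proved, stated in full; the proofs are below) =====
def Claim_equal_amountPainted : Prop := ∀ (paint : List (List Int)), Dom_amountPainted paint → Pre_amountPainted paint → Spec_amountPainted paint (amountPainted paint)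

-- ===== LEMMAS AND PROOFS =====

-- z is a painted cell for A (a key of parent)
def pvKey (parent : PySem.Dict Int Int) (z : Int) : Bool := (parent.get? z).isSome

-- A's invariant: every pointer jumps strictly forward over painted cells only
def pvInv (parent : PySem.Dict Int Int) : Prop :=
  ∀ x y, parent.get? x = some y → x < y ∧ ∀ z, x ≤ z → z < y → pvKey parent z = true

def pvNumGE (parent : PySem.Dict Int Int) (x : Int) : Nat :=
  (parent.items.filter (fun kv => decide (x ≤ kv.1))).length

lemma pvNumGE_lt (parent : PySem.Dict Int Int) (x p : Int)
    (h : parent.get? x = some p) (hx : x < p) : pvNumGE parent p < pvNumGE parent x := by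
  have hmem : (x, p) ∈ parent.items := PySem.Dict.mem_items_of_get?_eq_some parent h
  have hsub : parent.items.filter (fun kv => decide (p ≤ kv.1)) =
      (parent.items.filter (fun kv => decide (x ≤ kv.1))).filter (fun kv => decide (p ≤ kv.1)) := by
    rw [List.filter_filter]
    apply List.filter_congr
    intro kv _
    by_cases hk : p ≤ kv.1
    · have : x ≤ kv.1 := by omega
      simp [hk, this]
    · simp [hk]
  unfold pvNumGE
  rw [hsub]
  apply List.length_filter_lt_length_iff_exists.mpr
  refine ⟨(x, p), ?_, ?_⟩
  · exact List.mem_filter.mpr ⟨hmem, by simp⟩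
  · simp; omega

lemma pvNumGE_le_size (parent : PySem.Dict Int Int) (x : Int) :
    pvNumGE parent x ≤ parent.size := by
  exact List.length_filter_le _ _

lemma pvFindA_spec (fuel : Nat) (parent : PySem.Dict Int Int) (x : Int)
    (hInv : pvInv parent) (hfuel : pvNumGE parent x < fuel) :
    x ≤ (pvFindA fuel parent x).1 ∧
    pvKey parent (pvFindA fuel parent x).1 = false ∧
    (∀ z, x ≤ z → z < (pvFindA fuel parent x).1 → pvKey parent z = true) ∧
    (∀ z, pvKey (pvFindA fuel parent x).2 z = pvKey parent z) ∧
    pvInv (pvFindA fuel parent x).2 := by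
  induction fuel generalizing x with
  | zero => omega
  | succ f ih =>
    rcases h : parent.get? x with _ | p
    · simp only [pvFindA, h]
      refine ⟨le_refl x, ?_, ?_, ?_, hInv⟩
      · simp [pvKey, h]
      · intro z hz1 hz2; omega
      · intro z; trivial
    · obtain ⟨hxp, hrange⟩ := hInv x p h
      have hlt := pvNumGE_lt parent x p h hxp
      obtain ⟨h1, h2, h3, h4, h5⟩ := ih p (by omega)
      simp only [pvFindA, h]
      have hkey : ∀ z, pvKey ((pvFindA f parent p).2.insert x (pvFindA f parent p).1) z
          = (if z = x then true else pvKey parent z) := by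
        intro z
        by_cases hz : z = x
        · simp only [pvKey, PySem.Dict.get?_insert, hz, if_true, Option.isSome_some]
        · simp only [pvKey, PySem.Dict.get?_insert, if_neg hz]
          exact h4 z
      have hxr : x < (pvFindA f parent p).1 := by omega
      have hmid : ∀ z, x ≤ z → z < (pvFindA f parent p).1 → pvKey parent z = true := by
        intro z hz1 hz2
        by_cases hz : z < p
        · exact hrange z hz1 hz
        · exact h3 z (by omega) hz2
      refine ⟨by omega, ?_, hmid, ?_, ?_⟩
      · exact h2
      · intro z
        rw [hkey z]
        by_cases hz : z = x
        · rw [if_pos hz, hz]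
          simp [pvKey, h]
        · rw [if_neg hz]
      · intro a b hab
        by_cases ha : a = x
        · subst ha
          rw [PySem.Dict.get?_insert] at hab
          simp at hab
          subst hab
          refine ⟨hxr, ?_⟩
          intro z hz1 hz2
          rw [hkey z]
          by_cases hz : z = a
          · simp [hz]
          · simp [hz]; exact hmid z hz1 hz2
        · rw [PySem.Dict.get?_insert, if_neg ha] at hab
          obtain ⟨hb1, hb2⟩ := h5 a b hab
          refine ⟨hb1, ?_⟩
          intro z hz1 hz2
          rw [hkey z]
          by_cases hz : z = x
          · simp [hz]
          · simp [hz]; rw [← h4 z]; exact hb2 z hz1 hz2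

-- skipping an all-painted prefix [a,b) does not change the unpainted cells of [a,e)
lemma pvSkip (K : Int → Bool) (a b e : Int) (hab : a ≤ b)
    (hkeys : ∀ z, a ≤ z → z < b → K z = true) :
    (PySem.List.pyRange a e 1).filter (fun z => !K z) =
      (PySem.List.pyRange b e 1).filter (fun z => !K z) := by
  by_cases he : e ≤ a
  · rw [PySem.List.pyRange_one_eq_nil he, PySem.List.pyRange_one_eq_nil (by omega)]
  · by_cases hbe : b ≤ e
    · rw [PySem.List.pyRange_one_append a b e hab hbe, List.filter_append]
      have : (PySem.List.pyRange a b 1).filter (fun z => !K z) = [] := by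
        rw [List.filter_eq_nil_iff]
        intro z hz
        rw [PySem.List.mem_pyRange_one] at hz
        simp [hkeys z hz.1 hz.2]
      rw [this, List.nil_append]
    · rw [PySem.List.pyRange_one_eq_nil (show e ≤ b by omega), List.filter_nil,
        List.filter_eq_nil_iff]
      intro z hz
      rw [PySem.List.mem_pyRange_one] at hz
      simp [hkeys z hz.1 (by omega)]

lemma pvOrEq (K : Int → Bool) (a b e : Int) (hab : a ≤ b)
    (hkeys : ∀ z, a ≤ z → z < b → K z = true) (z : Int) :
    (K z || decide (b ≤ z ∧ z < e)) = (K z || decide (a ≤ z ∧ z < e)) := by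
  by_cases hK : K z = true
  · simp [hK]
  · rw [Bool.not_eq_true] at hK
    have hz : ¬ (a ≤ z ∧ z < b) := by
      intro hc
      rw [hkeys z hc.1 hc.2] at hK
      exact Bool.false_ne_true hK.symm
    simp only [hK, Bool.false_or]
    rw [decide_eq_decide]
    omega

lemma pvWhileA_spec (fuel : Nat) (parent : PySem.Dict Int Int) (i e painted : Int)
    (hInv : pvInv parent) (hi : pvKey parent i = false) (hfuel : (e - i).toNat ≤ fuel) :
    (pvWhileA fuel parent i e painted).1 =
      painted + ((PySem.List.pyRange i e 1).filter (fun z => !pvKey parent z)).length ∧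
    (∀ z, pvKey (pvWhileA fuel parent i e painted).2 z =
      (pvKey parent z || decide (i ≤ z ∧ z < e))) ∧
    pvInv (pvWhileA fuel parent i e painted).2 := by
  induction fuel generalizing parent i painted with
  | zero =>
    have he : e ≤ i := by omega
    simp only [pvWhileA]
    rw [PySem.List.pyRange_one_eq_nil he]
    refine ⟨by simp, ?_, hInv⟩
    intro z
    have : ¬ (i ≤ z ∧ z < e) := by omega
    simp [this]
  | succ f ih =>
    by_cases hie : i < e
    · simp only [pvWhileA, if_pos hie]
      -- the invariant holds after parent[i] = i + 1
      have hkey1 : ∀ z, pvKey (parent.insert i (i + 1)) z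
          = (if z = i then true else pvKey parent z) := by
        intro z
        by_cases hz : z = i
        · simp only [pvKey, PySem.Dict.get?_insert, hz, if_true, Option.isSome_some]
        · simp only [pvKey, PySem.Dict.get?_insert, if_neg hz]
      have hInv1 : pvInv (parent.insert i (i + 1)) := by
        intro a b hab
        rw [PySem.Dict.get?_insert] at hab
        by_cases ha : a = i
        · rw [if_pos ha] at hab
          injection hab with hab
          subst ha
          refine ⟨by omega, ?_⟩
          intro z hz1 hz2
          have : z = a := by omega
          rw [hkey1 z, if_pos this]
        · rw [if_neg ha] at hab
          obtain ⟨hb1, hb2⟩ := hInv a b hab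
          refine ⟨hb1, ?_⟩
          intro z hz1 hz2
          rw [hkey1 z]
          by_cases hz : z = i
          · simp [hz]
          · simp [hz]; exact hb2 z hz1 hz2
      obtain ⟨g1, g2, g3, g4, g5⟩ := pvFindA_spec ((parent.insert i (i + 1)).size + 1)
        (parent.insert i (i + 1)) (i + 1) hInv1
        (Nat.lt_succ_of_le (pvNumGE_le_size _ _))
      set F := pvFindA ((parent.insert i (i + 1)).size + 1) (parent.insert i (i + 1)) (i + 1)
        with hF
      have hiF : i < F.1 := by omega
      have hkeysIF : ∀ z, i ≤ z → z < F.1 → pvKey (parent.insert i (i + 1)) z = true := by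
        intro z hz1 hz2
        by_cases hz : z = i
        · rw [hkey1 z, if_pos hz]
        · exact g3 z (by omega) hz2
      obtain ⟨r1, r2, r3⟩ := ih F.2 F.1 (painted + 1)
        g5 (by rw [g4]; exact g2) (by omega)
      refine ⟨?_, ?_, r3⟩
      · rw [r1]
        have hstep : (PySem.List.pyRange i e 1).filter (fun z => !pvKey parent z)
            = i :: (PySem.List.pyRange F.1 e 1).filter (fun z => !pvKey F.2 z) := by
          rw [PySem.List.pyRange_one_cons hie]
          simp only [List.filter_cons, hi, Bool.not_false, if_true]
          congr 1
          have e1 : (PySem.List.pyRange (i + 1) e 1).filter (fun z => !pvKey parent z)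
              = (PySem.List.pyRange (i + 1) e 1).filter
                  (fun z => !pvKey (parent.insert i (i + 1)) z) := by
            apply List.filter_congr
            intro z hz
            rw [PySem.List.mem_pyRange_one] at hz
            rw [hkey1 z, if_neg (by omega)]
          have e2 := pvSkip (fun z => pvKey (parent.insert i (i + 1)) z) (i + 1) F.1 e
            g1 (fun z hz1 hz2 => g3 z hz1 hz2)
          rw [e1, e2]
          apply List.filter_congr
          intro z hz
          rw [g4 z]
        rw [hstep]
        simp only [List.length_cons]
        push_cast
        ring
      · intro z
        rw [r2 z, g4 z, pvOrEq (fun z => pvKey (parent.insert i (i + 1)) z) i F.1 e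
          (by omega) hkeysIF z, hkey1 z]
        by_cases hz : z = i
        · rw [if_pos hz]
          have : i ≤ z ∧ z < e := by omega
          simp [this]
        · rw [if_neg hz]
    · simp only [pvWhileA, if_neg hie]
      rw [PySem.List.pyRange_one_eq_nil (by omega)]
      refine ⟨by simp, ?_, hInv⟩
      intro z
      have : ¬ (i ≤ z ∧ z < e) := by omega
      simp [this]

-- one day of A (find + while) counts exactly the unpainted cells of [s,e) and paints them
lemma pvDayA (parent : PySem.Dict Int Int) (s e : Int) (hInv : pvInv parent) :
    (pvWhileA (e - (pvFindA (parent.size + 1) parent s).1).toNat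
        (pvFindA (parent.size + 1) parent s).2
        (pvFindA (parent.size + 1) parent s).1 e 0).1 =
      (((PySem.List.pyRange s e 1).filter (fun z => !pvKey parent z)).length : Int) ∧
    (∀ z, pvKey (pvWhileA (e - (pvFindA (parent.size + 1) parent s).1).toNat
        (pvFindA (parent.size + 1) parent s).2
        (pvFindA (parent.size + 1) parent s).1 e 0).2 z =
      (pvKey parent z || decide (s ≤ z ∧ z < e))) ∧
    pvInv (pvWhileA (e - (pvFindA (parent.size + 1) parent s).1).toNat
        (pvFindA (parent.size + 1) parent s).2
        (pvFindA (parent.size + 1) parent s).1 e 0).2 := by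
  obtain ⟨g1, g2, g3, g4, g5⟩ := pvFindA_spec (parent.size + 1) parent s hInv
    (Nat.lt_succ_of_le (pvNumGE_le_size _ _))
  set F := pvFindA (parent.size + 1) parent s with hF
  obtain ⟨r1, r2, r3⟩ := pvWhileA_spec (e - F.1).toNat F.2 F.1 e 0 g5
    (by rw [g4]; exact g2) (le_refl _)
  refine ⟨?_, ?_, r3⟩
  · rw [r1, zero_add]
    have e1 : (PySem.List.pyRange F.1 e 1).filter (fun z => !pvKey F.2 z)
        = (PySem.List.pyRange F.1 e 1).filter (fun z => !pvKey parent z) := by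
      apply List.filter_congr
      intro z _
      rw [g4 z]
    have e2 := pvSkip (fun z => pvKey parent z) s F.1 e g1 g3
    rw [e1, ← e2]
  · intro z
    rw [r2 z, g4 z, pvOrEq (fun z => pvKey parent z) s F.1 e g1 g3 z]

lemma pv_main (paint : List (List Int)) (resA resB : List Int)
    (parent : PySem.Dict Int Int) (bs : PySem.Set Int)
    (hrows : ∀ row ∈ paint, row.length = 2)
    (hInv : pvInv parent)
    (hRel : ∀ z, PySem.Set.contains bs z = pvKey parent z)
    (hres : resA = resB) :
    (paint.foldl (fun (acc : List Int × PySem.Dict Int Int) row =>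
      match row with
      | [s, e] =>
        let f0 := pvFindA (acc.2.size + 1) acc.2 s
        let w := pvWhileA (e - f0.1).toNat f0.2 f0.1 e 0
        (acc.1 ++ [w.1], w.2)
      | _ => acc) (resA, parent)).1 =
    (paint.foldl (fun (acc : List Int × PySem.Set Int) row =>
      if row.length = 2 then
        let s := row.getD 0 0
        let e := row.getD 1 0
        let new := (PySem.List.pyRange s e 1).filter (fun c => !(PySem.Set.contains acc.2 c))
        (acc.1 ++ [(new.length : Int)], PySem.Set.update acc.2 new)
      else acc) (resB, bs)).1 := by
  induction paint generalizing resA resB parent bs with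
  | nil => simpa using hres
  | cons row rest ih =>
    have hrow := hrows row List.mem_cons_self
    rcases row with _ | ⟨a, _ | ⟨b, _ | ⟨c, tl⟩⟩⟩ <;> simp at hrow
    simp only [List.foldl_cons]
    obtain ⟨d1, d2, d3⟩ := pvDayA parent a b hInv
    have hcnt : ((PySem.List.pyRange a b 1).filter (fun z => !pvKey parent z))
        = ((PySem.List.pyRange a b 1).filter (fun c => !(PySem.Set.contains bs c))) := by
      apply List.filter_congr
      intro z _
      rw [hRel z]
    have hRel' : ∀ z,
        PySem.Set.contains (PySem.Set.update bs
          ((PySem.List.pyRange a b 1).filter (fun c => !(PySem.Set.contains bs c)))) z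
        = pvKey (pvWhileA (b - (pvFindA (parent.size + 1) parent a).1).toNat
            (pvFindA (parent.size + 1) parent a).2
            (pvFindA (parent.size + 1) parent a).1 b 0).2 z := by
      intro z
      rw [Bool.eq_iff_iff, d2 z, PySem.Set.contains_iff, PySem.Set.mem_update]
      rw [List.mem_filter, PySem.List.mem_pyRange_one]
      constructor
      · rintro (hz | ⟨hz1, hz2⟩)
        · rw [← hRel z, (PySem.Set.contains_iff _ _).mpr hz]
          simp
        · simp [hz1]
      · intro hz
        rcases Bool.or_eq_true_iff.mp hz with hz | hz
        · left
          exact (PySem.Set.contains_iff _ _).mp (by rw [hRel z]; exact hz)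
        · by_cases hmem : z ∈ bs
          · left; exact hmem
          · right
            refine ⟨of_decide_eq_true hz, ?_⟩
            simp [hmem]
    have hres' : resA ++ [(pvWhileA (b - (pvFindA (parent.size + 1) parent a).1).toNat
            (pvFindA (parent.size + 1) parent a).2
            (pvFindA (parent.size + 1) parent a).1 b 0).1]
        = resB ++ [((((PySem.List.pyRange a b 1).filter
            (fun c => !(PySem.Set.contains bs c))).length : Int))] := by
      rw [hres, d1, hcnt]
    exact ih _ _ _ _ (fun r hr => hrows r (List.mem_cons_of_mem _ hr)) d3 hRel' hres'

-- ===== VERDICT (by name: the statement is the Claim_ definition above) =====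
theorem amountPainted_spec : Claim_equal_amountPainted := by
  intro paint _ hpre
  unfold Spec_amountPainted amountPainted amountPainted_alt
  exact (pv_main paint [] [] PySem.Dict.empty PySem.Set.empty hpre
    (by intro x y h; simp [PySem.Dict.get?_empty] at h)
    (by intro z; rfl) rfl)
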